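-- pv_equiv track=rewrite | github.com/AileenXie/leetcode | written-examination/0808wangyi/01.py | func
-- ===== SOURCE A (Python) =====
-- import functools
--
-- def func(n,a):
--     @functools.lru_cache(None)
--     def num_split(num):
--         if num<2: return False,0
--         if num == 2 or num == 3: return True,1
--         i = num//2
--         ans = 0
--         while i<num:
--             z = num-i
--             flag1,result1 = num_split(z)
--             flag2,result2 = num_split(i)
--             if flag1 and flag2:
--                 ans+=result1+result2
--                 return True, ans
--             i+=1
--         return True,1
--     ans = 0
--     for k in range(n):
--         flag, count= num_split(a[k])
--         ans+=count
--     return ans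
-- ===== SOURCE B (Python) =====
-- def func(n, a):
--     # Closed form: for m in [2^(k+1), 2^(k+2)) the recursive halving count is
--     # max(2^k, m - 2^(k+1)); find 2^k by doubling, no recursion/memoization needed.
--     total = 0
--     for k in range(n):
--         m = a[k]
--         if m < 2:
--             continue
--         p = 1
--         while 4 * p <= m:
--             p *= 2
--         total += max(p, m - 2 * p)
--     return total
-- ===== Notes on version B (the rewrite author's own statement) =====
-- stated objective: alternative
-- what changed: Replaces the memoized halving recursion (lru_cache + while loop over split points) with a closed form: for m in [2^(k+1), 2^(k+2)) the count equals max(2^k, m - 2^(k+1)), where 2^k is found by a simple doubling loop; no recursion, cache or tuple flags.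
import Mathlib
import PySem

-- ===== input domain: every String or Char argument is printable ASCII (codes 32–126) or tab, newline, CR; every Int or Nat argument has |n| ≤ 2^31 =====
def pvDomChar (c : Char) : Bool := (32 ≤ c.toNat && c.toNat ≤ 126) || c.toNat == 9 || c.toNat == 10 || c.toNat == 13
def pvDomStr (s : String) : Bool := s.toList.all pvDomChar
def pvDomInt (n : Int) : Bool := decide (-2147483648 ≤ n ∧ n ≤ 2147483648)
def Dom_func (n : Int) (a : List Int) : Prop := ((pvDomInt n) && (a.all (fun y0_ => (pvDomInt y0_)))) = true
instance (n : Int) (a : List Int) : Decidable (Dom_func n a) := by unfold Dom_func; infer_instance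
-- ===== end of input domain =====

-- B replaces A's memoized halving recursion by the closed form max(2^k, m - 2^(k+1)) found with a doubling loop (alternative algorithm, similar cost).
-- A raises IndexError when n > len(a); those inputs are outside Pre_func.


-- ===== PORT A =====
-- num_split with its @functools.lru_cache memo (threaded as a PySem.Dict) and its
-- inner while loop; the Nat argument is fuel making the mutual recursion
-- structurally terminating (func supplies m.toNat + 1, which is never exhausted).
mutual
def numSplitA : Nat → PySem.Dict Int (Bool × Int) → Int → PySem.Dict Int (Bool × Int) × (Bool × Int)
  | 0, c, _ => (c, (false, 0))   -- fuel guard only; unreachable with the fuel func passes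
  | f + 1, c, num =>
    match c.get? num with        -- lru_cache hit
    | some v => (c, v)
    | none =>
      if num < 2 then (c.insert num (false, 0), (false, 0))
      else if num = 2 ∨ num = 3 then (c.insert num (true, 1), (true, 1))
      else
        let r := loopA f c num (PySem.Int.floordiv num 2) 0
        (r.1.insert num r.2, r.2)
termination_by f c num => (f, 0, 0)

def loopA : Nat → PySem.Dict Int (Bool × Int) → Int → Int → Int → PySem.Dict Int (Bool × Int) × (Bool × Int)
  | f, c, num, i, ans =>
    if i < num then
      let z := num - i
      let p1 := numSplitA f c z
      let p2 := numSplitA f p1.1 i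
      if p1.2.1 && p2.2.1 then (p2.1, (true, ans + (p1.2.2 + p2.2.2)))
      else loopA f p2.1 num (i + 1) ans
    else (c, (true, 1))
termination_by f c num i ans => (f, 1, (num - i).toNat)
decreasing_by all_goals (first | (apply Prod.Lex.left; omega) | (apply Prod.Lex.right; first | (apply Prod.Lex.left; omega) | (apply Prod.Lex.right; omega)))
end

def func (n : Int) (a : List Int) : Int :=
  ((PySem.List.pyRange 0 n 1).foldl
    (fun (st : PySem.Dict Int (Bool × Int) × Int) k =>
      let m := (PySem.List.pyGet? a k).getD 0   -- a[k]; Pre_func keeps every k in range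
      let r := numSplitA (m.toNat + 1) st.1 m
      (r.1, st.2 + r.2.2))
    (PySem.Dict.empty, 0)).2

-- ===== PORT B =====
-- the doubling while-loop of Source B (fuel m.toNat is never exhausted on its inputs)
def powB : Nat → Int → Int → Int
  | 0, p, _ => p
  | f + 1, p, m => if 4 * p ≤ m then powB f (p * 2) m else p

def func_alt (n : Int) (a : List Int) : Int :=
  (PySem.List.pyRange 0 n 1).foldl (fun total k =>
    let m := (PySem.List.pyGet? a k).getD 0   -- a[k]; Pre_func keeps every k in range
    if m < 2 then total
    else
      let p := powB m.toNat 1 m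
      total + max p (m - 2 * p)) 0

-- ===== PRECONDITION & SPEC =====
-- A indexes a[k] for every k in range(n): it raises IndexError iff n > len(a).
def Pre_func (n : Int) (a : List Int) : Prop := n ≤ (a.length : Int)
instance (n : Int) (a : List Int) : Decidable (Pre_func n a) := by unfold Pre_func; infer_instance
def pvWitness_func : Int × List Int := (3, [2, 7, 10])

def Spec_func (n : Int) (a : List Int) (out : Int) : Prop := out = func_alt n a
instance (n : Int) (a : List Int) (out : Int) : Decidable (Spec_func n a out) := by unfold Spec_func; infer_instance

-- ===== CLAIM (what is proved, stated in full; the proofs are below) =====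
def Claim_equal_func : Prop := ∀ (n : Int) (a : List Int), Dom_func n a → Pre_func n a → Spec_func n a (func n a)

-- ===== LEMMAS AND PROOFS =====

-- the recursive count both programs compute: 0 below 2, 1 at 2 and 3, else the halving split
def cnt (m : Int) : Int :=
  if m < 2 then 0
  else if m = 2 ∨ m = 3 then 1
  else cnt (m / 2) + cnt (m - m / 2)
termination_by m.toNat
decreasing_by all_goals omega

-- every entry of A's memo cache is the value num_split would compute
def cacheOK (c : PySem.Dict Int (Bool × Int)) : Prop :=
  ∀ k v, c.get? k = some v → v = (decide (2 ≤ k), cnt k)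

theorem cacheOK_empty : cacheOK PySem.Dict.empty := by
  intro k v hk
  rw [PySem.Dict.get?_empty] at hk
  exact absurd hk (by simp)

theorem cacheOK_insert (c : PySem.Dict Int (Bool × Int)) (k : Int) (v : Bool × Int)
    (hok : cacheOK c) (hv : v = (decide (2 ≤ k), cnt k)) : cacheOK (c.insert k v) := by
  intro k' v' hk'
  rw [PySem.Dict.get?_insert] at hk'
  split_ifs at hk' with h
  · subst h; cases hk'; exact hv
  · exact hok k' v' hk'

theorem numSplitA_eq : ∀ (f : Nat) (m : Int) (c : PySem.Dict Int (Bool × Int)),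
    m.toNat < f → cacheOK c →
    (numSplitA f c m).2 = (decide (2 ≤ m), cnt m) ∧ cacheOK (numSplitA f c m).1 := by
  intro f
  induction f with
  | zero => intro m c h hok; omega
  | succ f ih =>
    intro m c h hok
    rw [numSplitA]
    cases hget : c.get? m with
    | some v =>
      exact ⟨hok m v hget, hok⟩
    | none =>
      by_cases h1 : m < 2
      · have h2 : decide ((2:Int) ≤ m) = false := by rw [decide_eq_false_iff_not]; omega
        have hc0 : cnt m = 0 := by rw [cnt, if_pos h1]
        rw [if_pos h1]
        exact ⟨by rw [h2, hc0], cacheOK_insert c m _ hok (by rw [h2, hc0])⟩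
      · by_cases h2 : m = 2 ∨ m = 3
        · have h3 : decide ((2:Int) ≤ m) = true := by rw [decide_eq_true_eq]; omega
          have hc1 : cnt m = 1 := by rw [cnt, if_neg h1, if_pos h2]
          rw [if_neg h1, if_pos h2]
          exact ⟨by rw [h3, hc1], cacheOK_insert c m _ hok (by rw [h3, hc1])⟩
        · have h4 : (4:Int) ≤ m := by omega
          have hfd : PySem.Int.floordiv m 2 = m / 2 :=
            PySem.Int.floordiv_eq_ediv_of_pos (by norm_num)
          have hg : m / 2 < m := by omega
          have hz : (m - m / 2).toNat < f := by omega
          have hi : (m / 2).toNat < f := by omega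
          obtain ⟨hv1, hok1⟩ := ih (m - m / 2) c hz hok
          obtain ⟨hv2, hok2⟩ := ih (m / 2) (numSplitA f c (m - m / 2)).1 hi hok1
          have d1 : decide ((2:Int) ≤ m - m / 2) = true := by rw [decide_eq_true_eq]; omega
          have d2 : decide ((2:Int) ≤ m / 2) = true := by rw [decide_eq_true_eq]; omega
          have d3 : decide ((2:Int) ≤ m) = true := by rw [decide_eq_true_eq]; omega
          have hcm : cnt m = cnt (m / 2) + cnt (m - m / 2) := by
            rw [cnt, if_neg h1, if_neg h2]
          have hloop : loopA f c m (m / 2) 0 =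
              ((numSplitA f (numSplitA f c (m - m / 2)).1 (m / 2)).1,
                (true, 0 + (cnt (m - m / 2) + cnt (m / 2)))) := by
            rw [loopA, if_pos hg]
            simp only [hv1, hv2, d1, d2, Bool.and_self, if_true]
          have hval : (true, 0 + (cnt (m - m / 2) + cnt (m / 2))) = (decide ((2:Int) ≤ m), cnt m) := by
            rw [d3, hcm]
            exact Prod.ext rfl (by ring)
          rw [if_neg h1, if_neg h2, hfd]
          simp only [hloop]
          exact ⟨hval, cacheOK_insert _ m _ hok2 hval⟩

theorem cnt_closed : ∀ (N : Nat) (m : Int) (k : Nat), m.toNat ≤ N →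
    2 ^ (k + 1) ≤ m → m < 2 ^ (k + 2) → cnt m = max ((2:Int) ^ k) (m - 2 ^ (k + 1)) := by
  intro N
  induction N with
  | zero =>
    intro m k hN h1 h2
    have hp : (0:Int) < 2 ^ (k + 1) := by positivity
    omega
  | succ N ih =>
    intro m k hN h1 h2
    by_cases hsm : m < 4
    · -- small case forces k = 0 and m ∈ {2, 3}
      have hk0 : k = 0 := by
        by_contra hk
        have h4' : (4:Int) ≤ 2 ^ (k + 1) := by
          calc (4:Int) = 2 ^ 2 := by norm_num
          _ ≤ 2 ^ (k + 1) := pow_le_pow_right₀ (by norm_num) (by omega)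
        omega
      subst hk0
      norm_num at h1 h2 ⊢
      have hm : m = 2 ∨ m = 3 := by omega
      rw [cnt, if_neg (by omega), if_pos hm]
      omega
    · -- m ≥ 4: split into the two halves and use the IH on both
      have h4 : (4:Int) ≤ m := by omega
      obtain ⟨j, rfl⟩ : ∃ j, k = j + 1 := by
        cases k with
        | zero => exfalso; norm_num at h2; omega
        | succ j => exact ⟨j, rfl⟩
      simp only [show j + 1 + 1 = j + 2 from by omega,
        show j + 1 + 2 = j + 3 from by omega] at h1 h2 ⊢
      have hA : (1:Int) ≤ 2 ^ j := one_le_pow₀ (by norm_num)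
      have e1 : (2:Int) ^ (j + 1) = 2 * 2 ^ j := by rw [pow_succ]; ring
      have e2 : (2:Int) ^ (j + 2) = 4 * 2 ^ j := by rw [pow_succ, pow_succ]; ring
      have e3 : (2:Int) ^ (j + 3) = 8 * 2 ^ j := by rw [pow_succ, pow_succ, pow_succ]; ring
      rw [cnt, if_neg (by omega), if_neg (by omega)]
      have hfl := ih (m / 2) j (by omega) (by omega) (by omega)
      by_cases hce : m - m / 2 < 2 ^ (j + 2)
      · have hceIH := ih (m - m / 2) j (by omega) (by omega) hce
        rw [hfl, hceIH]; omega
      · -- ceiling half hits the lower boundary of the next dyadic interval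
        have hceIH : cnt (m - m / 2) = max ((2:Int) ^ (j + 1)) ((m - m / 2) - 2 ^ (j + 2)) := by
          have h := ih (m - m / 2) (j + 1) (by omega)
            (by rw [show j + 1 + 1 = j + 2 from by omega]; omega)
            (by rw [show j + 1 + 2 = j + 3 from by omega]; omega)
          rw [show j + 1 + 1 = j + 2 from by omega] at h
          exact h
        rw [hfl, hceIH]; omega

theorem powB_eq : ∀ (f j k : Nat) (m : Int), j ≤ k → k - j < f →
    2 ^ (k + 1) ≤ m → m < 2 ^ (k + 2) → powB f ((2:Int) ^ j) m = 2 ^ k := by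
  intro f
  induction f with
  | zero => intro j k m hjk hf h1 h2; omega
  | succ f ih =>
    intro j k m hjk hf h1 h2
    rw [powB]
    by_cases hj : j = k
    · subst hj
      rw [if_neg]
      have e : (2:Int) ^ (j + 2) = 4 * 2 ^ j := by rw [pow_succ, pow_succ]; ring
      omega
    · rw [if_pos]
      · rw [show (2:Int) ^ j * 2 = 2 ^ (j + 1) from (pow_succ 2 j).symm]
        exact ih (j + 1) k m (by omega) (by omega) h1 h2
      · have e : (2:Int) ^ (j + 2) = 4 * 2 ^ j := by rw [pow_succ, pow_succ]; ring
        have mono : (2:Int) ^ (j + 2) ≤ 2 ^ (k + 1) := pow_le_pow_right₀ (by norm_num) (by omega)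
        omega

theorem exists_k (m : Int) (h : 2 ≤ m) : ∃ k : Nat, 2 ^ (k + 1) ≤ m ∧ m < 2 ^ (k + 2) := by
  set n := m.toNat with hn
  have hm : m = (n : Int) := by omega
  have hn2 : 2 ≤ n := by omega
  have hlog : 1 ≤ n.log2 := (Nat.le_log2 (by omega)).2 (by simpa using hn2)
  refine ⟨n.log2 - 1, ?_, ?_⟩
  · have := Nat.log2_self_le (n := n) (by omega)
    rw [hm, show n.log2 - 1 + 1 = n.log2 from by omega]
    exact_mod_cast this
  · have := Nat.lt_log2_self (n := n)
    rw [hm, show n.log2 - 1 + 2 = n.log2 + 1 from by omega]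
    exact_mod_cast this

theorem cnt_eq_B (m : Int) :
    cnt m = if m < 2 then (0:Int) else max (powB m.toNat 1 m) (m - 2 * powB m.toNat 1 m) := by
  by_cases h1 : m < 2
  · rw [if_pos h1, cnt, if_pos h1]
  · rw [if_neg h1]
    obtain ⟨k, hk1, hk2⟩ := exists_k m (by omega)
    have hk4 : (k : Int) + 2 ≤ 2 ^ (k + 1) := by
      have := Nat.lt_two_pow_self (n := k + 1)
      exact_mod_cast this
    have hp : powB m.toNat 1 m = 2 ^ k := by
      have := powB_eq m.toNat 0 k m (by omega) (by omega) hk1 hk2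
      simpa using this
    have hc := cnt_closed m.toNat m k (by omega) hk1 hk2
    rw [hp, hc, show (2:Int) * 2 ^ k = 2 ^ (k + 1) from by rw [pow_succ]; ring]

theorem fold_eq (a : List Int) : ∀ (l : List Int) (c : PySem.Dict Int (Bool × Int)) (acc : Int),
    cacheOK c →
    (l.foldl (fun (st : PySem.Dict Int (Bool × Int) × Int) k =>
        let m := (PySem.List.pyGet? a k).getD 0
        let r := numSplitA (m.toNat + 1) st.1 m
        (r.1, st.2 + r.2.2)) (c, acc)).2 =
      l.foldl (fun total k =>
        let m := (PySem.List.pyGet? a k).getD 0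
        if m < 2 then total
        else
          let p := powB m.toNat 1 m
          total + max p (m - 2 * p)) acc := by
  intro l
  induction l with
  | nil => intro c acc _; rfl
  | cons x l ihl =>
    intro c acc hok
    simp only [List.foldl_cons]
    obtain ⟨hv, hok'⟩ := numSplitA_eq (((PySem.List.pyGet? a x).getD 0).toNat + 1)
      ((PySem.List.pyGet? a x).getD 0) c (by omega) hok
    rw [ihl _ _ hok']
    congr 1
    rw [hv, cnt_eq_B]
    dsimp only
    split_ifs with h
    · ring
    · rfl

-- ===== VERDICT (by name: the statement is the Claim_ definition above) =====
theorem func_spec : Claim_equal_func := by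
  intro n a _ _
  unfold Spec_func func func_alt
  exact fold_eq a (PySem.List.pyRange 0 n 1) PySem.Dict.empty 0 cacheOK_empty
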